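-- pv_equiv track=rewrite | github.com/Re2o/re2o | re2o/base.py | convert_datetime_format
-- ===== SOURCE A (Python) =====
-- datetime_mapping = {
--     "%a": "%a",
--     "%A": "%A",
--     "%w": "%w",
--     "%d": "dd",
--     "%b": "%b",
--     "%B": "%B",
--     "%m": "mm",
--     "%y": "yy",
--     "%Y": "yyyy",
--     "%H": "HH",
--     "%I": "HH(12h)",
--     "%p": "AMPM",
--     "%M": "MM",
--     "%S": "SS",
--     "%f": "µµ",
--     "%z": "UTC(+/-HHMM)",
--     "%Z": "UTC(TZ)",
--     "%j": "%j",
--     "%U": "ww",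
--     "%W": "ww",
--     "%c": "%c",
--     "%x": "%x",
--     "%X": "%X",
--     "%%": "%%",
-- }
--
-- def convert_datetime_format(format):
--     i = 0
--     new_format = ""
--     while i < len(format):
--         if format[i] == "%":
--             char = format[i : i + 2]
--             new_format += datetime_mapping.get(char, char)
--             i += 2
--         else:
--             new_format += format[i]
--             i += 1
--     return new_format
-- ===== SOURCE B (Python) =====
-- datetime_mapping = {
--     "%a": "%a",
--     "%A": "%A",
--     "%w": "%w",
--     "%d": "dd",
--     "%b": "%b",
--     "%B": "%B",
--     "%m": "mm",
--     "%y": "yy",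
--     "%Y": "yyyy",
--     "%H": "HH",
--     "%I": "HH(12h)",
--     "%p": "AMPM",
--     "%M": "MM",
--     "%S": "SS",
--     "%f": "µµ",
--     "%z": "UTC(+/-HHMM)",
--     "%Z": "UTC(TZ)",
--     "%j": "%j",
--     "%U": "ww",
--     "%W": "ww",
--     "%c": "%c",
--     "%x": "%x",
--     "%X": "%X",
--     "%%": "%%",
-- }
--
-- def convert_datetime_format(format):
--     # Chunked scan: jump from '%' to '%' with str.find and copy the plain
--     # text between tokens wholesale, joining the pieces at the end.
--     parts = []
--     i = 0
--     n = len(format)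
--     while i < n:
--         j = format.find("%", i)
--         if j == -1:
--             parts.append(format[i:])
--             break
--         parts.append(format[i:j])
--         tok = format[j : j + 2]
--         parts.append(datetime_mapping.get(tok, tok))
--         i = j + 2
--     return "".join(parts)
-- ===== Notes on version B (the rewrite author's own statement) =====
-- stated objective: faster
-- what changed: Replaces the per-character index loop (string += with a dict probe at each step) by a chunked scan that uses str.find to jump between format tokens, copies the plain text between tokens wholesale, and joins the collected pieces at the end.
import Mathlib
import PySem

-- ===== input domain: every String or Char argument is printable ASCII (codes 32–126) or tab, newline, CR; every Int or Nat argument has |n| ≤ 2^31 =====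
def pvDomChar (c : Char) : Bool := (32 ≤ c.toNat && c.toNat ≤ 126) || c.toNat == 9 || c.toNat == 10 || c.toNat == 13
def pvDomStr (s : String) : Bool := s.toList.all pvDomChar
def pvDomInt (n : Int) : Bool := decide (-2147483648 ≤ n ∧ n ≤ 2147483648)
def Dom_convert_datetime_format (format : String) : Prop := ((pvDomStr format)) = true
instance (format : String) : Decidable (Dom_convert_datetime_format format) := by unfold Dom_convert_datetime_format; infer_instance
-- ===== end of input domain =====

-- B replaces A's per-character index loop by a find-based chunked scan that copies
-- plain text between tokens wholesale and joins the pieces at the end (objective: faster,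
-- measured; A's repeated string += is quadratic in practice).

-- the module-level datetime_mapping dict, shared data of both programs
def dtMap : PySem.Dict String String := PySem.Dict.ofList
  [("%a", "%a"), ("%A", "%A"), ("%w", "%w"), ("%d", "dd"), ("%b", "%b"),
   ("%B", "%B"), ("%m", "mm"), ("%y", "yy"), ("%Y", "yyyy"), ("%H", "HH"),
   ("%I", "HH(12h)"), ("%p", "AMPM"), ("%M", "MM"), ("%S", "SS"), ("%f", "µµ"),
   ("%z", "UTC(+/-HHMM)"), ("%Z", "UTC(TZ)"), ("%j", "%j"), ("%U", "ww"),
   ("%W", "ww"), ("%c", "%c"), ("%x", "%x"), ("%X", "%X"), ("%%", "%%")]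

-- datetime_mapping.get(tok, tok) over the token's character list
def dtLookup (tok : List Char) : List Char :=
  (dtMap.getD (String.mk tok) (String.mk tok)).toList

-- ===== PORT A =====
-- the while loop: i is the index, acc is new_format
def cdfLoopA (cs : List Char) (i : Nat) (acc : List Char) : List Char :=
  if h : i < cs.length then
    if cs[i] = '%' then
      let char := (cs.drop i).take 2          -- format[i : i + 2]
      cdfLoopA cs (i + 2) (acc ++ dtLookup char)
    else
      cdfLoopA cs (i + 1) (acc ++ [cs[i]])
  else acc
termination_by cs.length - i

def convert_datetime_format (format : String) : String :=
  String.mk (cdfLoopA format.toList 0 [])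

-- ===== PORT B =====
-- the while loop over the remaining suffix: format.find('%', i) becomes findIdx? on
-- the suffix; parts collects the chunks, joined at the end
def cdfLoopB (cs : List Char) (parts : List (List Char)) : List (List Char) :=
  match hj : cs.findIdx? (· = '%') with
  | none => parts ++ [cs]
  | some j =>
    let tok := (cs.drop j).take 2
    cdfLoopB (cs.drop (j + 2)) (parts ++ [cs.take j, dtLookup tok])
termination_by cs.length
decreasing_by
  have hlt : j < cs.length := (List.findIdx?_eq_some_iff_getElem.mp hj).1
  simp only [List.length_drop]; omega

def convert_datetime_format_alt (format : String) : String :=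
  String.mk (cdfLoopB format.toList []).flatten

-- ===== PRECONDITION & SPEC =====
def Spec_convert_datetime_format (format : String) (out : String) : Prop := out = convert_datetime_format_alt format
instance (format : String) (out : String) : Decidable (Spec_convert_datetime_format format out) := by unfold Spec_convert_datetime_format; infer_instance

-- ===== CLAIM (what is proved, stated in full; the proofs are below) =====
def Claim_equal_convert_datetime_format : Prop := ∀ (format : String), Dom_convert_datetime_format format → Spec_convert_datetime_format format (convert_datetime_format format)

-- ===== LEMMAS AND PROOFS =====

-- canonical recursion both loops are reduced to
def cdfSpec (cs : List Char) : List Char :=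
  match cs with
  | [] => []
  | c :: rest =>
    if c = '%' then dtLookup (c :: rest.take 1) ++ cdfSpec (rest.drop 1)
    else c :: cdfSpec rest
termination_by cs.length
decreasing_by
  · simp only [List.length_drop, List.length_cons]; omega
  · simp only [List.length_cons]; omega

lemma cdfLoopA_eq_spec (cs : List Char) (i : Nat) (acc : List Char) :
    cdfLoopA cs i acc = acc ++ cdfSpec (cs.drop i) := by
  induction i, acc using cdfLoopA.induct cs with
  | case1 i acc h hpc _char ih =>
    rw [cdfLoopA]
    have hdrop : cs.drop i = cs[i] :: cs.drop (i + 1) :=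
      List.drop_eq_getElem_cons h
    simp only [h, dif_pos, hpc, if_pos]
    rw [ih, hdrop, cdfSpec]
    have h2 : (cs.drop (i + 1)).drop 1 = cs.drop (i + 2) := by
      rw [List.drop_drop]
    have h3 : (cs.drop i).take 2 = cs[i] :: (cs.drop (i + 1)).take 1 := by
      rw [hdrop]; rfl
    rw [hpc] at h3
    simp [h2, hpc]
    exact congrArg dtLookup h3
  | case2 i acc h hpc ih =>
    rw [cdfLoopA]
    have hdrop : cs.drop i = cs[i] :: cs.drop (i + 1) :=
      List.drop_eq_getElem_cons h
    simp only [h, dif_pos, hpc]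
    rw [ih, hdrop, cdfSpec]
    simp [hpc]
  | case3 i acc h =>
    rw [cdfLoopA]
    have hnil : cs.drop i = [] := List.drop_eq_nil_of_le (by omega)
    simp [h, hnil, cdfSpec]

lemma cdfSpec_no_pct (cs : List Char) (h : ∀ c ∈ cs, ¬ c = '%') : cdfSpec cs = cs := by
  induction cs with
  | nil => rw [cdfSpec]
  | cons c rest ih =>
    rw [cdfSpec]
    have hc : ¬ c = '%' := h c (List.mem_cons_self)
    simp only [hc, if_false]
    rw [ih (fun x hx => h x (List.mem_cons_of_mem _ hx))]

lemma cdfSpec_append_no_pct (p cs : List Char) (h : ∀ c ∈ p, ¬ c = '%') :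
    cdfSpec (p ++ cs) = p ++ cdfSpec cs := by
  induction p with
  | nil => simp
  | cons c rest ih =>
    have hc : ¬ c = '%' := h c (List.mem_cons_self)
    rw [List.cons_append, cdfSpec]
    simp only [hc, if_false]
    rw [ih (fun x hx => h x (List.mem_cons_of_mem _ hx)), List.cons_append]

lemma cdfLoopB_eq_spec (cs : List Char) (parts : List (List Char)) :
    (cdfLoopB cs parts).flatten = parts.flatten ++ cdfSpec cs := by
  induction cs, parts using cdfLoopB.induct with
  | case1 cs parts hj =>
    rw [cdfLoopB]
    split
    case h_2 j heq => rw [hj] at heq; exact absurd heq (by simp)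
    case h_1 heq =>
      have hno : ∀ c ∈ cs, ¬ c = '%' := by
        intro c hc
        have := List.findIdx?_eq_none_iff.mp hj c hc
        simpa using this
      simp [cdfSpec_no_pct cs hno]
  | case2 cs parts j hj tok ih =>
    rw [cdfLoopB]
    split
    case h_1 heq => rw [hj] at heq; exact absurd heq (by simp)
    case h_2 j' heq =>
      have hj' : j = j' := by rw [hj] at heq; exact Option.some.inj heq
      subst hj'
      rw [ih]
      have hjlt : j < cs.length := (List.findIdx?_eq_some_iff_getElem.mp hj).1
      have hgetpct : cs[j] = '%' := by
        have hp := (List.findIdx?_eq_some_iff_getElem.mp hj).2.1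
        simpa using hp
      have hpre : ∀ c ∈ cs.take j, ¬ c = '%' := by
        intro c hc
        obtain ⟨k, hk, hck⟩ := List.mem_take_iff_getElem.mp hc
        have hkj : k < j := by omega
        have hmin := (List.findIdx?_eq_some_iff_getElem.mp hj).2.2 k hkj
        rw [← hck]
        simpa using hmin
      have hdropj : cs.drop j = cs[j] :: cs.drop (j + 1) := List.drop_eq_getElem_cons hjlt
      have hmain : cdfSpec cs = cs.take j ++ (dtLookup ((cs.drop j).take 2) ++ cdfSpec (cs.drop (j + 2))) := by
        calc cdfSpec cs = cdfSpec (cs.take j ++ cs.drop j) := by rw [List.take_append_drop]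
          _ = cs.take j ++ cdfSpec (cs.drop j) := cdfSpec_append_no_pct _ _ hpre
          _ = _ := by
              rw [hdropj, cdfSpec]
              have h2 : (cs.drop (j + 1)).drop 1 = cs.drop (j + 2) := by rw [List.drop_drop]
              have h3 : (cs.drop j).take 2 = cs[j] :: (cs.drop (j + 1)).take 1 := by
                rw [hdropj]; rfl
              simp [hgetpct, h2]
      rw [hmain]
      simp [tok]

-- ===== VERDICT (by name: the statement is the Claim_ definition above) =====
theorem convert_datetime_format_spec : Claim_equal_convert_datetime_format := by
  intro format _
  unfold Spec_convert_datetime_format convert_datetime_format convert_datetime_format_alt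
  rw [cdfLoopA_eq_spec, cdfLoopB_eq_spec]
  simp
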